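-- pv_equiv track=rewrite | github.com/DataDog/datadog-agent | tasks/omnibus.py | _packages_from_deb_metadata
-- ===== SOURCE A (Python) =====
-- from collections.abc import Iterator
-- from typing import NamedTuple
--
-- class DebPackageInfo(NamedTuple):
--     package_name: str | None
--     filename: str | None
--     sha256: str | None
--
--     @classmethod
--     def from_metadata(cls, package_info: dict) -> "DebPackageInfo":
--         """Creates a DebPackageInfo object from a dictionary of package metadata."""
--         return cls(
--             package_name=package_info.get("Package"),
--             filename=package_info.get("Filename"),
--             sha256=package_info.get("SHA256"),
--         )
--
-- def _packages_from_deb_metadata(lines: Iterator[str]) -> Iterator[DebPackageInfo]: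
--     """Generator function that yields package blocks from the lines of a deb Packages metadata file."""
--     package_info = {}
--     for line in lines:
--         # Empty line indicates end of package block
--         if not line.strip():
--             if package_info:
--                 yield DebPackageInfo.from_metadata(package_info)
--                 package_info = {}  # Reset for next package
--             continue
--
--         try:
--             key, value = line.split(":", 1)
--             package_info[key] = value.strip()
--         except ValueError:
--             continue
--
--     # Don't forget the last package if it exists
--     if package_info:
--         yield DebPackageInfo.from_metadata(package_info)
-- ===== SOURCE B (Python) =====
-- from collections.abc import Iterator
-- from itertools import groupby
-- from typing import NamedTuple
--
--
-- class DebPackageInfo(NamedTuple):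
--     package_name: str | None
--     filename: str | None
--     sha256: str | None
--
--     @classmethod
--     def from_metadata(cls, package_info: dict) -> "DebPackageInfo":
--         """Creates a DebPackageInfo object from a dictionary of package metadata."""
--         return cls(
--             package_name=package_info.get("Package"),
--             filename=package_info.get("Filename"),
--             sha256=package_info.get("SHA256"),
--         )
--
--
-- def _packages_from_deb_metadata(lines: Iterator[str]) -> Iterator[DebPackageInfo]:
--     """Group the stream into runs of blank/non-blank lines; parse each non-blank run."""
--     for nonblank, group in groupby(lines, key=lambda l: bool(l.strip())):
--         if not nonblank:
--             continue
--         info = {}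
--         for line in group:
--             try:
--                 key, value = line.split(":", 1)
--             except ValueError:
--                 continue
--             info[key] = value.strip()
--         if info:
--             yield DebPackageInfo.from_metadata(info)
-- ===== Notes on version B (the rewrite author's own statement) =====
-- stated objective: alternative
-- what changed: Replaces A's single accumulator-and-reset loop (dict carried across lines, flushed on blanks and at the end) with a grouping decomposition: the stream is split into runs of non-blank lines via itertools.groupby and each run is parsed into a dict and emitted independently.
import Mathlib
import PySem

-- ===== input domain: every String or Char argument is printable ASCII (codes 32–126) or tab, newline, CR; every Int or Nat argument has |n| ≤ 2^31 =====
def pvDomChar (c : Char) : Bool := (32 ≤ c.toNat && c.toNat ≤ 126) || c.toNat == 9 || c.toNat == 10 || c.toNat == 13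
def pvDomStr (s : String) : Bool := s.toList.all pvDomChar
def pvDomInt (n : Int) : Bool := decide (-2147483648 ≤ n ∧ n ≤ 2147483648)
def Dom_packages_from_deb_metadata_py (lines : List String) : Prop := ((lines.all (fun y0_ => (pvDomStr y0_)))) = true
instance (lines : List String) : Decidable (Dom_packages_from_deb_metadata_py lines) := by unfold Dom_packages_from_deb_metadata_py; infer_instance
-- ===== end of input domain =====

-- B replaces A's accumulator-and-reset loop by a grouping decomposition (split into
-- runs of non-blank lines, parse each run independently); objective: alternative.


-- DebPackageInfo.from_metadata, a module helper both versions call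
def pvFromMeta (d : PySem.Dict String String) : Option String × Option String × Option String :=
  (d.get? "Package", d.get? "Filename", d.get? "SHA256")

-- ===== PORT A =====
-- the generator loop: dict accumulator, flushed (yield = cons) on blank lines and at the end
def pvAloop (d : PySem.Dict String String) : List String → List (Option String × Option String × Option String)
  | [] => if d.items.isEmpty then [] else [pvFromMeta d]
  | l :: ls =>
    if PySem.Str.strip l == "" then
      if d.items.isEmpty then pvAloop d ls else pvFromMeta d :: pvAloop PySem.Dict.empty ls
    else
      match PySem.Str.splitMax? l ":" 1 with
      | some [k, v] => pvAloop (d.insert k (PySem.Str.strip v)) ls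
      | _ => pvAloop d ls

def packages_from_deb_metadata_py (lines : List String) : List (Option String × Option String × Option String) :=
  pvAloop PySem.Dict.empty lines

-- ===== PORT B =====
def pvBlank (l : String) : Bool := PySem.Str.strip l == ""

-- groupby(lines, key=bool(l.strip())) restricted to the key-True runs
def pvBlocks : List String → List (List String)
  | [] => []
  | l :: ls =>
    if pvBlank l then pvBlocks ls
    else (l :: ls.takeWhile (fun x => !pvBlank x)) :: pvBlocks (ls.dropWhile (fun x => !pvBlank x))
termination_by ls => ls.length
decreasing_by
  all_goals simp only [List.length_cons]
  · omega
  · have := List.length_dropWhile_le (fun x => !pvBlank x) ls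
    omega

-- the inner 'for line in group' loop of B
def pvParseBlock (blk : List String) : PySem.Dict String String :=
  blk.foldl (fun d line =>
    match PySem.Str.splitMax? line ":" 1 with
    | some [k, v] => d.insert k (PySem.Str.strip v)
    | _ => d) PySem.Dict.empty

def pvEmit (blk : List String) : Option (Option String × Option String × Option String) :=
  let d := pvParseBlock blk
  if d.items.isEmpty then none else some (pvFromMeta d)

def packages_from_deb_metadata_py_alt (lines : List String) : List (Option String × Option String × Option String) :=
  (pvBlocks lines).filterMap pvEmit

-- ===== PRECONDITION & SPEC =====
def Spec_packages_from_deb_metadata_py (lines : List String) (out : List (Option String × Option String × Option String)) : Prop := out = packages_from_deb_metadata_py_alt lines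
instance (lines : List String) (out : List (Option String × Option String × Option String)) : Decidable (Spec_packages_from_deb_metadata_py lines out) := by unfold Spec_packages_from_deb_metadata_py; infer_instance

-- ===== CLAIM (what is proved, stated in full; the proofs are below) =====
def Claim_equal_packages_from_deb_metadata_py : Prop := ∀ (lines : List String), Dom_packages_from_deb_metadata_py lines → Spec_packages_from_deb_metadata_py lines (packages_from_deb_metadata_py lines)

-- ===== LEMMAS AND PROOFS =====

-- running A's loop through a run of non-blank lines just folds the parse step
theorem pvAloop_run (blk : List String) (rest : List String)
    (h : ∀ l ∈ blk, pvBlank l = false) (d : PySem.Dict String String) :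
    pvAloop d (blk ++ rest) =
      pvAloop (blk.foldl (fun d line =>
        match PySem.Str.splitMax? line ":" 1 with
        | some [k, v] => d.insert k (PySem.Str.strip v)
        | _ => d) d) rest := by
  induction blk generalizing d with
  | nil => simp
  | cons l ls ih =>
    have hl : pvBlank l = false := h l (by simp)
    have hls : ∀ x ∈ ls, pvBlank x = false := fun x hx => h x (by simp [hx])
    simp only [List.cons_append, List.foldl_cons]
    rw [pvAloop]
    simp only [pvBlank] at hl
    rw [hl]
    cases hsp : PySem.Str.splitMax? l ":" 1 with
    | none => exact ih hls _
    | some parts =>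
      match parts with
      | [] => exact ih hls _
      | [_] => exact ih hls _
      | [k, v] => exact ih hls _
      | _ :: _ :: _ :: _ => exact ih hls _

-- the same, phrased with B's block parser (definitionally the same fold)
theorem pvAloop_block (blk : List String) (rest : List String)
    (h : ∀ l ∈ blk, pvBlank l = false) :
    pvAloop PySem.Dict.empty (blk ++ rest) = pvAloop (pvParseBlock blk) rest :=
  pvAloop_run blk rest h PySem.Dict.empty

theorem dict_empty_of_items_nil {d : PySem.Dict String String}
    (h : d.items = []) : d = PySem.Dict.empty := by
  apply PySem.Dict.ext
  simpa [PySem.Dict.empty] using h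

theorem pvEmit_pos (blk : List String) (h : (pvParseBlock blk).items = []) :
    pvEmit blk = none := by
  simp [pvEmit, h]

theorem pvEmit_neg (blk : List String) (h : ¬ (pvParseBlock blk).items = []) :
    pvEmit blk = some (pvFromMeta (pvParseBlock blk)) := by
  simp [pvEmit, List.isEmpty_iff, h]

-- the first element surviving dropWhile fails the predicate
theorem pv_dropWhile_head_false (p : String → Bool) :
    ∀ (ls : List String) (r : String) (rs : List String),
      ls.dropWhile p = r :: rs → p r = false := by
  intro ls
  induction ls with
  | nil => intro r rs h; simp [List.dropWhile] at h
  | cons a as ih =>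
    intro r rs h
    rw [List.dropWhile_cons] at h
    by_cases hp : p a = true
    · rw [if_pos hp] at h; exact ih r rs h
    · rw [if_neg hp] at h
      injection h with h1 _
      subst h1
      simpa using hp

theorem pv_main (n : Nat) : ∀ ls : List String, ls.length ≤ n →
    pvAloop PySem.Dict.empty ls = packages_from_deb_metadata_py_alt ls := by
  induction n with
  | zero =>
    intro ls h
    have : ls = [] := List.eq_nil_of_length_eq_zero (Nat.le_zero.mp h)
    subst this
    simp [pvAloop, packages_from_deb_metadata_py_alt, pvBlocks, PySem.Dict.empty]
  | succ m ih =>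
    intro ls h
    match ls with
    | [] => simp [pvAloop, packages_from_deb_metadata_py_alt, pvBlocks, PySem.Dict.empty]
    | l :: ls =>
      have hlen : ls.length ≤ m := by simpa using Nat.le_of_succ_le_succ h
      cases hbb : pvBlank l with
      | true =>
        -- blank first line: both sides skip it
        have hstrip : (PySem.Str.strip l == "") = true := hbb
        rw [pvAloop, if_pos hstrip,
          if_pos (show (PySem.Dict.empty : PySem.Dict String String).items.isEmpty = true by
            simp [PySem.Dict.empty])]
        rw [ih ls hlen]
        simp only [packages_from_deb_metadata_py_alt]
        rw [pvBlocks, if_pos hbb]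
      | false =>
        -- non-blank first line: peel off the head block
        have hnb : ∀ x ∈ l :: ls.takeWhile (fun x => !pvBlank x), pvBlank x = false := by
          intro x hx
          rcases List.mem_cons.mp hx with rfl | hx'
          · exact hbb
          · simpa using List.mem_takeWhile_imp hx'
        have hsplit : l :: ls =
            (l :: ls.takeWhile (fun x => !pvBlank x)) ++ ls.dropWhile (fun x => !pvBlank x) := by
          simp [List.takeWhile_append_dropWhile]
        conv_lhs => rw [hsplit]
        rw [pvAloop_block _ _ hnb]
        simp only [packages_from_deb_metadata_py_alt]
        rw [pvBlocks, if_neg (by simp [hbb]), List.filterMap_cons]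
        have hdlen := List.length_dropWhile_le (fun x => !pvBlank x) ls
        by_cases he : (pvParseBlock (l :: ls.takeWhile (fun x => !pvBlank x))).items = []
        · rw [pvEmit_pos _ he, dict_empty_of_items_nil he]
          cases hr : ls.dropWhile (fun x => !pvBlank x) with
          | nil => simp [pvAloop, pvBlocks, PySem.Dict.empty]
          | cons r rs =>
            have hrb : pvBlank r = true := by
              simpa using pv_dropWhile_head_false (fun x => !pvBlank x) ls r rs hr
            have hrslen : rs.length ≤ m := by
              rw [hr] at hdlen; simp at hdlen; omega
            rw [pvAloop, if_pos (show (PySem.Str.strip r == "") = true from hrb),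
              if_pos (show (PySem.Dict.empty : PySem.Dict String String).items.isEmpty = true by
                simp [PySem.Dict.empty])]
            rw [ih rs hrslen]
            simp only [packages_from_deb_metadata_py_alt]
            rw [pvBlocks, if_pos hrb]
        · rw [pvEmit_neg _ he]
          have hne : (pvParseBlock (l :: ls.takeWhile (fun x => !pvBlank x))).items.isEmpty ≠ true := by
            simp [List.isEmpty_iff, he]
          cases hr : ls.dropWhile (fun x => !pvBlank x) with
          | nil =>
            rw [pvAloop, if_neg hne]
            simp [pvBlocks]
          | cons r rs =>
            have hrb : pvBlank r = true := by
              simpa using pv_dropWhile_head_false (fun x => !pvBlank x) ls r rs hr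
            have hrslen : rs.length ≤ m := by
              rw [hr] at hdlen; simp at hdlen; omega
            rw [pvAloop, if_pos (show (PySem.Str.strip r == "") = true from hrb), if_neg hne]
            rw [ih rs hrslen]
            simp only [packages_from_deb_metadata_py_alt]
            rw [pvBlocks, if_pos hrb]

-- ===== VERDICT (by name: the statement is the Claim_ definition above) =====
theorem packages_from_deb_metadata_py_spec : Claim_equal_packages_from_deb_metadata_py := by
  intro lines _
  show packages_from_deb_metadata_py lines = packages_from_deb_metadata_py_alt lines
  exact pv_main lines.length lines le_rfl
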